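-- pv_equiv track=rewrite | github.com/ajay-bhargava/frame-ble-connect | src/api/services/parking_service.py | _normalize_street_name
-- ===== SOURCE A (Python) =====
-- def _normalize_street_name(street_name: str) -> str:
--     """
--     Normalize street name for API queries
--     Convert common variations to standard NYC format
--     """
--     if not street_name:
--         return ""
--
--     # Convert to uppercase and trim whitespace
--     normalized = street_name.upper().strip()
--
--     # Only do minimal normalization - don't replace existing full words
--     # This prevents corruption of already correct street names
--     replacements = {
--         "ST.": "STREET",
--         "AVE.": "AVENUE",
--         "BLVD.": "BOULEVARD",
--         "RD.": "ROAD",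
--         "DR.": "DRIVE",
--         "PL.": "PLACE"
--     }
--
--     # Apply only abbreviation replacements
--     for old, new in replacements.items():
--         normalized = normalized.replace(old, new)
--
--     return normalized
-- ===== SOURCE B (Python) =====
-- # Single left-to-right scan over the normalized string, replacing each
-- # abbreviation where it occurs, instead of six sequential full-string passes.
--
-- _ABBREVIATIONS = {
--     "ST.": "STREET",
--     "AVE.": "AVENUE",
--     "BLVD.": "BOULEVARD",
--     "RD.": "ROAD",
--     "DR.": "DRIVE",
--     "PL.": "PLACE",
-- }
--
--
-- def _normalize_street_name(street_name: str) -> str: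
--     """Normalize street name for API queries (single-pass scan)."""
--     if not street_name:
--         return ""
--
--     s = street_name.upper().strip()
--     out = []
--     i = 0
--     while i < len(s):
--         for old, new in _ABBREVIATIONS.items():
--             if s.startswith(old, i):
--                 out.append(new)
--                 i += len(old)
--                 break
--         else:
--             out.append(s[i])
--             i += 1
--     return "".join(out)
-- ===== Notes on version B (the rewrite author's own statement) =====
-- stated objective: alternative
-- what changed: Six sequential full-string replace passes are replaced by one left-to-right scan that expands each abbreviation once where it occurs.
-- intended difference: On inputs whose upper-cased stripped form contains "RD.R.", "BLVD.." or "BLVD.R.", A's later replace passes re-match text produced by an earlier pass and return a corrupted hybrid name, while B expands each abbreviation exactly once where it occurs, which is the intended normalization. — e.g. on _normalize_street_name("RD.R."): A returns "ROADRIVE", B returns "ROADR."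
import Mathlib
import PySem

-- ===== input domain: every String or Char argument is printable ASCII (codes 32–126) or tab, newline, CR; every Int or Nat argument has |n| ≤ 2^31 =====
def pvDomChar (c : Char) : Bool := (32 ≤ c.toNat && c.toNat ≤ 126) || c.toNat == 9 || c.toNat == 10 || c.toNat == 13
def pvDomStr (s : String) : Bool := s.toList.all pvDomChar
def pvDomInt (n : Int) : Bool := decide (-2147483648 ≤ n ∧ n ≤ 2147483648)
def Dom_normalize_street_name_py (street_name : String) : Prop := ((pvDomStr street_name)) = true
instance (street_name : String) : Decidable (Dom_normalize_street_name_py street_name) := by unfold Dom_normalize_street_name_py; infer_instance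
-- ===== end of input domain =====

-- B replaces A's six sequential full-string replace passes by one left-to-right
-- table-driven scan; on the exceptional cascading inputs (D_ below) A corrupts the
-- name and B returns the intended expansion.

-- ===== PORT A =====
def normalize_street_name_py (street_name : String) : String :=
  if street_name = "" then ""
  else
    let normalized := PySem.Str.strip (PySem.Str.upper street_name)
    let n1 := PySem.Str.replace normalized "ST." "STREET"
    let n2 := PySem.Str.replace n1 "AVE." "AVENUE"
    let n3 := PySem.Str.replace n2 "BLVD." "BOULEVARD"
    let n4 := PySem.Str.replace n3 "RD." "ROAD"
    let n5 := PySem.Str.replace n4 "DR." "DRIVE"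
    let n6 := PySem.Str.replace n5 "PL." "PLACE"
    n6

-- ===== PORT B =====
-- Source B's single scan: at each position try the table entries in dict order
-- (startswith = the literal pattern), otherwise copy one character.
def goB : List Char → List Char
  | 'S'::'T'::'.'::t => "STREET".toList ++ goB t
  | 'A'::'V'::'E'::'.'::t => "AVENUE".toList ++ goB t
  | 'B'::'L'::'V'::'D'::'.'::t => "BOULEVARD".toList ++ goB t
  | 'R'::'D'::'.'::t => "ROAD".toList ++ goB t
  | 'D'::'R'::'.'::t => "DRIVE".toList ++ goB t
  | 'P'::'L'::'.'::t => "PLACE".toList ++ goB t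
  | c :: t => c :: goB t
  | [] => []

def normalize_street_name_py_alt (street_name : String) : String :=
  if street_name = "" then ""
  else String.ofList (goB (PySem.Str.strip (PySem.Str.upper street_name)).toList)

-- ===== PRECONDITION & SPEC =====
-- On inputs whose upper-cased stripped form contains "RD.R.", "BLVD.." or "BLVD.R.",
-- A's later replace passes re-match text produced by an earlier pass and return a
-- corrupted hybrid name, while B expands each abbreviation exactly once where it
-- occurs, which is the intended normalization.
def D_normalize_street_name_py (street_name : String) : Prop :=
  ∃ p ∈ ["RD.R.", "BLVD..", "BLVD.R."],
    PySem.Str.isIn p (PySem.Str.strip (PySem.Str.upper street_name)) = true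
instance (street_name : String) : Decidable (D_normalize_street_name_py street_name) := by
  unfold D_normalize_street_name_py; infer_instance

def Spec_normalize_street_name_py (street_name : String) (out : String) : Prop :=
  ¬ D_normalize_street_name_py street_name → out = normalize_street_name_py_alt street_name
instance (street_name : String) (out : String) : Decidable (Spec_normalize_street_name_py street_name out) := by
  unfold Spec_normalize_street_name_py; infer_instance

def pvDiffWitness_normalize_street_name_py : String := "RD.R."
def pvDiffWitnessOut_normalize_street_name_py : String × String := ("ROADRIVE", "ROADR.")

-- ===== CLAIM (what is proved, stated in full; the proofs are below) =====
def Claim_unchanged_normalize_street_name_py : Prop := ∀ (street_name : String), Dom_normalize_street_name_py street_name → Spec_normalize_street_name_py street_name (normalize_street_name_py street_name)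
def Claim_changed_normalize_street_name_py : Prop := Dom_normalize_street_name_py (pvDiffWitness_normalize_street_name_py) ∧ D_normalize_street_name_py (pvDiffWitness_normalize_street_name_py) ∧ normalize_street_name_py (pvDiffWitness_normalize_street_name_py) = pvDiffWitnessOut_normalize_street_name_py.1 ∧ normalize_street_name_py_alt (pvDiffWitness_normalize_street_name_py) = pvDiffWitnessOut_normalize_street_name_py.2 ∧ pvDiffWitnessOut_normalize_street_name_py.1 ≠ pvDiffWitnessOut_normalize_street_name_py.2
def Claim_exact_normalize_street_name_py : Prop := ∀ (street_name : String), Dom_normalize_street_name_py street_name → D_normalize_street_name_py street_name → normalize_street_name_py street_name ≠ normalize_street_name_py_alt street_name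

-- ===== LEMMAS AND PROOFS =====

-- pvRep: a simple structural model of CPython's str.replace (for a nonempty
-- pattern): replace the leftmost occurrence and continue after the insertion.
def pvRep (old new : List Char) : List Char → List Char
  | [] => []
  | c :: t =>
    if old.isPrefixOf (c :: t) then new ++ pvRep old new (t.drop (old.length - 1))
    else c :: pvRep old new t
  termination_by l => l.length
  decreasing_by all_goals (simp; try omega)

lemma pvNot_prefix_append {u v x : List Char} (h1 : ¬ u <+: v) (h2 : ¬ v <+: u) :
    ¬ v <+: u ++ x := by
  intro h
  by_cases hle : v.length ≤ u.length
  · exact h2 (List.prefix_of_prefix_length_le h (List.prefix_append u x) hle)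
  · exact h1 (List.prefix_of_prefix_length_le (List.prefix_append u x) h (by omega))

lemma pvRep_skip (old new : List Char) (c : Char) (t : List Char) (h : ¬ old <+: (c :: t)) :
    pvRep old new (c :: t) = c :: pvRep old new t := by
  rw [pvRep, if_neg]
  simpa [List.isPrefixOf_iff_prefix] using h

lemma pvRep_match (old new t : List Char) (h : old ≠ []) :
    pvRep old new (old ++ t) = new ++ pvRep old new t := by
  cases old with
  | nil => exact absurd rfl h
  | cons a o =>
    have hp : (a :: o).isPrefixOf (a :: (o ++ t)) = true := by
      rw [List.isPrefixOf_iff_prefix, List.cons_prefix_cons]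
      exact ⟨rfl, ⟨t, rfl⟩⟩
    rw [List.cons_append, pvRep, if_pos hp]
    simp

lemma pvRep_head? (old new : List Char) (hv : new.head? = old.head?) (hne : old ≠ []) :
    ∀ l, (pvRep old new l).head? = l.head? := by
  intro l
  cases l with
  | nil => rw [pvRep]
  | cons c t =>
    rw [pvRep]
    by_cases hp : old.isPrefixOf (c :: t) = true
    · rw [if_pos hp]
      have hpre : old <+: c :: t := List.isPrefixOf_iff_prefix.mp hp
      obtain ⟨a, o, rfl⟩ : ∃ a o, old = a :: o := by
        cases old with
        | nil => exact absurd rfl hne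
        | cons a o => exact ⟨a, o, rfl⟩
      have hac : a = c := (List.cons_prefix_cons.mp hpre).1
      obtain ⟨n0, nn, rfl⟩ : ∃ n0 nn, new = n0 :: nn := by
        cases new with
        | nil => simp at hv
        | cons n0 nn => exact ⟨n0, nn, rfl⟩
      simp at hv
      simp [hv, hac]
    · rw [if_neg hp]
      rfl

lemma pvRep_go_eq (old new : List Char) (h : old ≠ []) :
    ∀ (fuel : Nat) (l acc : List Char), l.length ≤ fuel →
      PySem.Chars.replace.go old new fuel l acc = acc.reverse ++ pvRep old new l := by
  intro fuel
  induction fuel with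
  | zero =>
    intro l acc hl
    have hln : l = [] := List.eq_nil_of_length_eq_zero (Nat.le_antisymm hl (Nat.zero_le _))
    subst hln
    rw [PySem.Chars.replace.go.eq_def, pvRep]
  | succ fuel ih =>
    intro l acc hl
    cases l with
    | nil =>
      rw [PySem.Chars.replace.go.eq_def, pvRep]
      dsimp only
      simp
    | cons c t =>
      rw [PySem.Chars.replace.go.eq_def]
      dsimp only
      by_cases hp : old.isPrefixOf (c :: t) = true
      · rw [if_pos hp]
        obtain ⟨a, o, rfl⟩ : ∃ a o, old = a :: o := by
          cases old with
          | nil => exact absurd rfl h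
          | cons a o => exact ⟨a, o, rfl⟩
        have hd : List.drop (a :: o).length (c :: t) = t.drop ((a :: o).length - 1) := by
          simp
        have hlen : (List.drop (a :: o).length (c :: t)).length ≤ fuel := by
          simp at hl ⊢
          omega
        rw [ih _ _ hlen, pvRep, if_pos hp, hd]
        simp
      · rw [if_neg hp, ih t (c :: acc) (by simp at hl; omega), pvRep, if_neg hp]
        simp

lemma pvReplace_eq_pvRep (s old new : List Char) (h : old ≠ []) :
    PySem.Chars.replace s old new = pvRep old new s := by
  unfold PySem.Chars.replace
  rw [if_neg (by simpa using h)]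
  simpa using pvRep_go_eq old new h s.length s [] le_rfl

lemma pvRep_prefix_iff (old new P : List Char)
    (hcomp : ∀ i, i < P.length →
      ¬(P.drop i <+: old) ∧ ¬(old <+: P.drop i) ∧ ¬(P.drop i <+: new) ∧ ¬(new <+: P.drop i)) :
    ∀ (l : List Char) (i : Nat), i ≤ P.length →
      ((P.drop i <+: pvRep old new l) ↔ (P.drop i <+: l)) := by
  intro l
  induction l using pvRep.induct old with
  | case1 =>
    intro i hi
    rw [pvRep]
  | case2 c t hp ih =>
    intro i hi
    rcases Nat.eq_or_lt_of_le hi with heq | hlt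
    · subst heq
      simp [List.drop_length]
    · obtain ⟨h1, h2, h3, h4⟩ := hcomp i hlt
      rw [pvRep, if_pos hp]
      obtain ⟨r, hr⟩ := List.isPrefixOf_iff_prefix.mp hp
      constructor
      · intro hx
        exact absurd hx (pvNot_prefix_append h4 h3)
      · intro hx
        rw [← hr] at hx
        exact absurd hx (pvNot_prefix_append h2 h1)
  | case3 c t hp ih =>
    intro i hi
    rcases Nat.eq_or_lt_of_le hi with heq | hlt
    · subst heq
      simp [List.drop_length]
    · rw [pvRep, if_neg hp]
      rw [List.drop_eq_getElem_cons hlt]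
      rw [List.cons_prefix_cons, List.cons_prefix_cons]
      have := ih (i + 1) hlt
      tauto

lemma pvRep_prefix_iff' (old new P : List Char)
    (hcomp : ∀ i, i < P.length →
      ¬(P.drop i <+: old) ∧ ¬(old <+: P.drop i) ∧ ¬(P.drop i <+: new) ∧ ¬(new <+: P.drop i))
    (l : List Char) :
    ((P <+: pvRep old new l) ↔ (P <+: l)) := by
  simpa using pvRep_prefix_iff old new P hcomp l 0 (Nat.zero_le _)

lemma pvRep_append (old new W : List Char)
    (h : ∀ i, i < W.length → ¬(W.drop i <+: old) ∧ ¬(old <+: W.drop i)) :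
    ∀ x : List Char, pvRep old new (W ++ x) = W ++ pvRep old new x := by
  induction W with
  | nil => intro x; simp
  | cons c W' ihW =>
    intro x
    have h0 := h 0 (by simp)
    simp only [List.drop_zero] at h0
    rw [List.cons_append,
        pvRep_skip _ _ _ _ (by simpa [List.append_assoc] using pvNot_prefix_append h0.1 h0.2 (x := x)),
        ihW (fun i hi => by simpa using h (i + 1) (by simpa using hi)) x]
    simp

def pvChain (l : List Char) : List Char :=
  pvRep ['P','L','.'] ['P','L','A','C','E']
    (pvRep ['D','R','.'] ['D','R','I','V','E']
      (pvRep ['R','D','.'] ['R','O','A','D']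
        (pvRep ['B','L','V','D','.'] ['B','O','U','L','E','V','A','R','D']
          (pvRep ['A','V','E','.'] ['A','V','E','N','U','E']
            (pvRep ['S','T','.'] ['S','T','R','E','E','T'] l)))))

def pvBad (l : List Char) : Prop :=
  ['R','D','.','R','.'] <:+: l ∨ ['B','L','V','D','.','.'] <:+: l ∨ ['B','L','V','D','.','R','.'] <:+: l

lemma pvBad_tail {c : Char} {t : List Char} (h : ¬ pvBad (c :: t)) : ¬ pvBad t := by
  intro hb
  apply h
  have step : ∀ x : List Char, x <:+: t → x <:+: c :: t := by
    rintro x ⟨u, v, huv⟩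
    exact ⟨c :: u, v, by rw [← huv]; rfl⟩
  rcases hb with h1 | h1 | h1
  · exact Or.inl (step _ h1)
  · exact Or.inr (Or.inl (step _ h1))
  · exact Or.inr (Or.inr (step _ h1))

-- "RD." can re-match inside "BOULEVARD" ++ x only when x starts with '.'
lemma pvRep_RD_after_BOULEVARD (x : List Char) (hx : x.head? ≠ some '.') :
    pvRep ['R','D','.'] ['R','O','A','D'] (['B','O','U','L','E','V','A','R','D'] ++ x)
      = ['B','O','U','L','E','V','A','R','D'] ++ pvRep ['R','D','.'] ['R','O','A','D'] x := by
  have hRD : ¬ (['R','D','.'] <+: 'R' :: 'D' :: x) := by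
    intro hh
    rw [List.cons_prefix_cons, List.cons_prefix_cons] at hh
    obtain ⟨-, -, s, hs⟩ := hh
    rw [← hs] at hx
    simp at hx
  simp only [List.cons_append, List.nil_append]
  rw [pvRep_skip _ _ _ _ (by simp [List.cons_prefix_cons]),
      pvRep_skip _ _ _ _ (by simp [List.cons_prefix_cons]),
      pvRep_skip _ _ _ _ (by simp [List.cons_prefix_cons]),
      pvRep_skip _ _ _ _ (by simp [List.cons_prefix_cons]),
      pvRep_skip _ _ _ _ (by simp [List.cons_prefix_cons]),
      pvRep_skip _ _ _ _ (by simp [List.cons_prefix_cons]),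
      pvRep_skip _ _ _ _ (by simp [List.cons_prefix_cons]),
      pvRep_skip _ _ _ _ hRD,
      pvRep_skip _ _ _ _ (by simp [List.cons_prefix_cons])]

-- "DR." can re-match after a value ending in 'D' only when x starts with "R."
lemma pvRep_DR_after_BOULEVARD (x : List Char) (hx : ¬ (['R','.'] <+: x)) :
    pvRep ['D','R','.'] ['D','R','I','V','E'] (['B','O','U','L','E','V','A','R','D'] ++ x)
      = ['B','O','U','L','E','V','A','R','D'] ++ pvRep ['D','R','.'] ['D','R','I','V','E'] x := by
  have hDR : ¬ (['D','R','.'] <+: 'D' :: x) := by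
    intro hh
    rw [List.cons_prefix_cons] at hh
    exact hx hh.2
  simp only [List.cons_append, List.nil_append]
  rw [pvRep_skip _ _ _ _ (by simp [List.cons_prefix_cons]),
      pvRep_skip _ _ _ _ (by simp [List.cons_prefix_cons]),
      pvRep_skip _ _ _ _ (by simp [List.cons_prefix_cons]),
      pvRep_skip _ _ _ _ (by simp [List.cons_prefix_cons]),
      pvRep_skip _ _ _ _ (by simp [List.cons_prefix_cons]),
      pvRep_skip _ _ _ _ (by simp [List.cons_prefix_cons]),
      pvRep_skip _ _ _ _ (by simp [List.cons_prefix_cons]),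
      pvRep_skip _ _ _ _ (by simp [List.cons_prefix_cons]),
      pvRep_skip _ _ _ _ hDR]

lemma pvRep_DR_after_ROAD (x : List Char) (hx : ¬ (['R','.'] <+: x)) :
    pvRep ['D','R','.'] ['D','R','I','V','E'] (['R','O','A','D'] ++ x)
      = ['R','O','A','D'] ++ pvRep ['D','R','.'] ['D','R','I','V','E'] x := by
  have hDR : ¬ (['D','R','.'] <+: 'D' :: x) := by
    intro hh
    rw [List.cons_prefix_cons] at hh
    exact hx hh.2
  simp only [List.cons_append, List.nil_append]
  rw [pvRep_skip _ _ _ _ (by simp [List.cons_prefix_cons]),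
      pvRep_skip _ _ _ _ (by simp [List.cons_prefix_cons]),
      pvRep_skip _ _ _ _ (by simp [List.cons_prefix_cons]),
      pvRep_skip _ _ _ _ hDR]

lemma pvChain_ST (rest : List Char) :
    pvChain (['S','T','.'] ++ rest) = ['S','T','R','E','E','T'] ++ pvChain rest := by
  unfold pvChain
  rw [pvRep_match _ _ _ (by decide),
      pvRep_append ['A','V','E','.'] ['A','V','E','N','U','E'] ['S','T','R','E','E','T'] (by decide),
      pvRep_append ['B','L','V','D','.'] ['B','O','U','L','E','V','A','R','D'] ['S','T','R','E','E','T'] (by decide),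
      pvRep_append ['R','D','.'] ['R','O','A','D'] ['S','T','R','E','E','T'] (by decide),
      pvRep_append ['D','R','.'] ['D','R','I','V','E'] ['S','T','R','E','E','T'] (by decide),
      pvRep_append ['P','L','.'] ['P','L','A','C','E'] ['S','T','R','E','E','T'] (by decide)]

lemma pvChain_AVE (rest : List Char) :
    pvChain (['A','V','E','.'] ++ rest) = ['A','V','E','N','U','E'] ++ pvChain rest := by
  unfold pvChain
  rw [pvRep_append ['S','T','.'] ['S','T','R','E','E','T'] ['A','V','E','.'] (by decide),
      pvRep_match _ _ _ (by decide),
      pvRep_append ['B','L','V','D','.'] ['B','O','U','L','E','V','A','R','D'] ['A','V','E','N','U','E'] (by decide),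
      pvRep_append ['R','D','.'] ['R','O','A','D'] ['A','V','E','N','U','E'] (by decide),
      pvRep_append ['D','R','.'] ['D','R','I','V','E'] ['A','V','E','N','U','E'] (by decide),
      pvRep_append ['P','L','.'] ['P','L','A','C','E'] ['A','V','E','N','U','E'] (by decide)]

lemma pvChain_DR (rest : List Char) :
    pvChain (['D','R','.'] ++ rest) = ['D','R','I','V','E'] ++ pvChain rest := by
  unfold pvChain
  rw [pvRep_append ['S','T','.'] ['S','T','R','E','E','T'] ['D','R','.'] (by decide),
      pvRep_append ['A','V','E','.'] ['A','V','E','N','U','E'] ['D','R','.'] (by decide),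
      pvRep_append ['B','L','V','D','.'] ['B','O','U','L','E','V','A','R','D'] ['D','R','.'] (by decide),
      pvRep_append ['R','D','.'] ['R','O','A','D'] ['D','R','.'] (by decide),
      pvRep_match _ _ _ (by decide),
      pvRep_append ['P','L','.'] ['P','L','A','C','E'] ['D','R','I','V','E'] (by decide)]

lemma pvChain_PL (rest : List Char) :
    pvChain (['P','L','.'] ++ rest) = ['P','L','A','C','E'] ++ pvChain rest := by
  unfold pvChain
  rw [pvRep_append ['S','T','.'] ['S','T','R','E','E','T'] ['P','L','.'] (by decide),
      pvRep_append ['A','V','E','.'] ['A','V','E','N','U','E'] ['P','L','.'] (by decide),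
      pvRep_append ['B','L','V','D','.'] ['B','O','U','L','E','V','A','R','D'] ['P','L','.'] (by decide),
      pvRep_append ['R','D','.'] ['R','O','A','D'] ['P','L','.'] (by decide),
      pvRep_append ['D','R','.'] ['D','R','I','V','E'] ['P','L','.'] (by decide),
      pvRep_match _ _ _ (by decide)]

lemma pvChain_RD (rest : List Char) (hR : ¬ (['R','.'] <+: rest)) :
    pvChain (['R','D','.'] ++ rest) = ['R','O','A','D'] ++ pvChain rest := by
  unfold pvChain
  rw [pvRep_append ['S','T','.'] ['S','T','R','E','E','T'] ['R','D','.'] (by decide),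
      pvRep_append ['A','V','E','.'] ['A','V','E','N','U','E'] ['R','D','.'] (by decide),
      pvRep_append ['B','L','V','D','.'] ['B','O','U','L','E','V','A','R','D'] ['R','D','.'] (by decide),
      pvRep_match _ _ _ (by decide)]
  have hR4 : ¬ (['R','.'] <+: pvRep ['R','D','.'] ['R','O','A','D']
      (pvRep ['B','L','V','D','.'] ['B','O','U','L','E','V','A','R','D']
        (pvRep ['A','V','E','.'] ['A','V','E','N','U','E']
          (pvRep ['S','T','.'] ['S','T','R','E','E','T'] rest)))) := by
    rw [pvRep_prefix_iff' _ _ _ (by decide), pvRep_prefix_iff' _ _ _ (by decide),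
        pvRep_prefix_iff' _ _ _ (by decide), pvRep_prefix_iff' _ _ _ (by decide)]
    exact hR
  rw [pvRep_DR_after_ROAD _ hR4,
      pvRep_append ['P','L','.'] ['P','L','A','C','E'] ['R','O','A','D'] (by decide)]

lemma pvChain_BLVD (rest : List Char) (hdot : rest.head? ≠ some '.') (hR : ¬ (['R','.'] <+: rest)) :
    pvChain (['B','L','V','D','.'] ++ rest) = ['B','O','U','L','E','V','A','R','D'] ++ pvChain rest := by
  unfold pvChain
  rw [pvRep_append ['S','T','.'] ['S','T','R','E','E','T'] ['B','L','V','D','.'] (by decide),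
      pvRep_append ['A','V','E','.'] ['A','V','E','N','U','E'] ['B','L','V','D','.'] (by decide),
      pvRep_match _ _ _ (by decide)]
  have hdot3 : (pvRep ['B','L','V','D','.'] ['B','O','U','L','E','V','A','R','D']
      (pvRep ['A','V','E','.'] ['A','V','E','N','U','E']
        (pvRep ['S','T','.'] ['S','T','R','E','E','T'] rest))).head? ≠ some '.' := by
    rw [pvRep_head? _ _ (by decide) (by decide), pvRep_head? _ _ (by decide) (by decide),
        pvRep_head? _ _ (by decide) (by decide)]
    exact hdot
  rw [pvRep_RD_after_BOULEVARD _ hdot3]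
  have hR4 : ¬ (['R','.'] <+: pvRep ['R','D','.'] ['R','O','A','D']
      (pvRep ['B','L','V','D','.'] ['B','O','U','L','E','V','A','R','D']
        (pvRep ['A','V','E','.'] ['A','V','E','N','U','E']
          (pvRep ['S','T','.'] ['S','T','R','E','E','T'] rest)))) := by
    rw [pvRep_prefix_iff' _ _ _ (by decide), pvRep_prefix_iff' _ _ _ (by decide),
        pvRep_prefix_iff' _ _ _ (by decide), pvRep_prefix_iff' _ _ _ (by decide)]
    exact hR
  rw [pvRep_DR_after_BOULEVARD _ hR4,
      pvRep_append ['P','L','.'] ['P','L','A','C','E'] ['B','O','U','L','E','V','A','R','D'] (by decide)]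

lemma pvChain_step (c : Char) (t : List Char)
    (h1 : ¬ (['S','T','.'] <+: c :: t)) (h2 : ¬ (['A','V','E','.'] <+: c :: t))
    (h3 : ¬ (['B','L','V','D','.'] <+: c :: t)) (h4 : ¬ (['R','D','.'] <+: c :: t))
    (h5 : ¬ (['D','R','.'] <+: c :: t)) (h6 : ¬ (['P','L','.'] <+: c :: t)) :
    pvChain (c :: t) = c :: pvChain t := by
  have e1 := pvRep_skip ['S','T','.'] ['S','T','R','E','E','T'] c t h1
  have n2 : ¬ (['A','V','E','.'] <+: c :: pvRep ['S','T','.'] ['S','T','R','E','E','T'] t) := by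
    rw [← e1, pvRep_prefix_iff' _ _ _ (by decide)]
    exact h2
  have e2 := pvRep_skip ['A','V','E','.'] ['A','V','E','N','U','E'] c _ n2
  have n3 : ¬ (['B','L','V','D','.'] <+: c :: pvRep ['A','V','E','.'] ['A','V','E','N','U','E'] (pvRep ['S','T','.'] ['S','T','R','E','E','T'] t)) := by
    rw [← e2, ← e1, pvRep_prefix_iff' _ _ _ (by decide), pvRep_prefix_iff' _ _ _ (by decide)]
    exact h3
  have e3 := pvRep_skip ['B','L','V','D','.'] ['B','O','U','L','E','V','A','R','D'] c _ n3
  have n4 : ¬ (['R','D','.'] <+: c :: pvRep ['B','L','V','D','.'] ['B','O','U','L','E','V','A','R','D'] (pvRep ['A','V','E','.'] ['A','V','E','N','U','E'] (pvRep ['S','T','.'] ['S','T','R','E','E','T'] t))) := by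
    rw [← e3, ← e2, ← e1, pvRep_prefix_iff' _ _ _ (by decide), pvRep_prefix_iff' _ _ _ (by decide), pvRep_prefix_iff' _ _ _ (by decide)]
    exact h4
  have e4 := pvRep_skip ['R','D','.'] ['R','O','A','D'] c _ n4
  have n5 : ¬ (['D','R','.'] <+: c :: pvRep ['R','D','.'] ['R','O','A','D'] (pvRep ['B','L','V','D','.'] ['B','O','U','L','E','V','A','R','D'] (pvRep ['A','V','E','.'] ['A','V','E','N','U','E'] (pvRep ['S','T','.'] ['S','T','R','E','E','T'] t)))) := by
    rw [← e4, ← e3, ← e2, ← e1, pvRep_prefix_iff' _ _ _ (by decide), pvRep_prefix_iff' _ _ _ (by decide), pvRep_prefix_iff' _ _ _ (by decide), pvRep_prefix_iff' _ _ _ (by decide)]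
    exact h5
  have e5 := pvRep_skip ['D','R','.'] ['D','R','I','V','E'] c _ n5
  have n6 : ¬ (['P','L','.'] <+: c :: pvRep ['D','R','.'] ['D','R','I','V','E'] (pvRep ['R','D','.'] ['R','O','A','D'] (pvRep ['B','L','V','D','.'] ['B','O','U','L','E','V','A','R','D'] (pvRep ['A','V','E','.'] ['A','V','E','N','U','E'] (pvRep ['S','T','.'] ['S','T','R','E','E','T'] t))))) := by
    rw [← e5, ← e4, ← e3, ← e2, ← e1, pvRep_prefix_iff' _ _ _ (by decide), pvRep_prefix_iff' _ _ _ (by decide), pvRep_prefix_iff' _ _ _ (by decide), pvRep_prefix_iff' _ _ _ (by decide), pvRep_prefix_iff' _ _ _ (by decide)]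
    exact h6
  have e6 := pvRep_skip ['P','L','.'] ['P','L','A','C','E'] c _ n6
  unfold pvChain
  rw [e1, e2, e3, e4, e5, e6]

lemma pvMain : ∀ l : List Char, ¬ pvBad l → pvChain l = goB l := by
  intro l
  induction l using goB.induct with
  | case1 t ih =>
    intro hb
    have hl : ('S'::'T'::'.'::t) = ['S','T','.'] ++ t := rfl
    rw [hl, pvChain_ST, ih (pvBad_tail (pvBad_tail (pvBad_tail hb))), ← hl]
    simp [goB, show "STREET".toList = ['S','T','R','E','E','T'] from by decide]
  | case2 t ih =>
    intro hb
    have hl : ('A'::'V'::'E'::'.'::t) = ['A','V','E','.'] ++ t := rfl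
    rw [hl, pvChain_AVE, ih (pvBad_tail (pvBad_tail (pvBad_tail (pvBad_tail hb)))), ← hl]
    simp [goB, show "AVENUE".toList = ['A','V','E','N','U','E'] from by decide]
  | case3 t ih =>
    intro hb
    have hdot : t.head? ≠ some '.' := by
      intro hh
      cases t with
      | nil => simp at hh
      | cons a r =>
        simp at hh
        subst hh
        have hp : List.IsPrefix ['B','L','V','D','.','.'] ('B'::'L'::'V'::'D'::'.'::'.'::r) := ⟨r, rfl⟩
        exact hb (Or.inr (Or.inl hp.isInfix))
    have hR : ¬ (['R','.'] <+: t) := by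
      rintro ⟨r, hr⟩
      apply hb
      refine Or.inr (Or.inr ?_)
      have hp : List.IsPrefix ['B','L','V','D','.','R','.'] ('B'::'L'::'V'::'D'::'.'::t) := by
        refine ⟨r, ?_⟩
        simp only [List.cons_append, List.nil_append] at hr ⊢
        rw [← hr]
      exact hp.isInfix
    have hl : ('B'::'L'::'V'::'D'::'.'::t) = ['B','L','V','D','.'] ++ t := rfl
    rw [hl, pvChain_BLVD t hdot hR, ih (pvBad_tail (pvBad_tail (pvBad_tail (pvBad_tail (pvBad_tail hb))))), ← hl]
    simp [goB, show "BOULEVARD".toList = ['B','O','U','L','E','V','A','R','D'] from by decide]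
  | case4 t ih =>
    intro hb
    have hR : ¬ (['R','.'] <+: t) := by
      rintro ⟨r, hr⟩
      apply hb
      refine Or.inl ?_
      have hp : List.IsPrefix ['R','D','.','R','.'] ('R'::'D'::'.'::t) := by
        refine ⟨r, ?_⟩
        simp only [List.cons_append, List.nil_append] at hr ⊢
        rw [← hr]
      exact hp.isInfix
    have hl : ('R'::'D'::'.'::t) = ['R','D','.'] ++ t := rfl
    rw [hl, pvChain_RD t hR, ih (pvBad_tail (pvBad_tail (pvBad_tail hb))), ← hl]
    simp [goB, show "ROAD".toList = ['R','O','A','D'] from by decide]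
  | case5 t ih =>
    intro hb
    have hl : ('D'::'R'::'.'::t) = ['D','R','.'] ++ t := rfl
    rw [hl, pvChain_DR, ih (pvBad_tail (pvBad_tail (pvBad_tail hb))), ← hl]
    simp [goB, show "DRIVE".toList = ['D','R','I','V','E'] from by decide]
  | case6 t ih =>
    intro hb
    have hl : ('P'::'L'::'.'::t) = ['P','L','.'] ++ t := rfl
    rw [hl, pvChain_PL, ih (pvBad_tail (pvBad_tail (pvBad_tail hb))), ← hl]
    simp [goB, show "PLACE".toList = ['P','L','A','C','E'] from by decide]
  | case7 c t h1 h2 h3 h4 h5 h6 ih =>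
    intro hb
    have n1 : ¬ (['S','T','.'] <+: c :: t) := by
      rintro ⟨r, hr⟩
      simp only [List.cons_append, List.nil_append, List.cons.injEq] at hr
      exact h1 r hr.1.symm hr.2.symm
    have n2 : ¬ (['A','V','E','.'] <+: c :: t) := by
      rintro ⟨r, hr⟩
      simp only [List.cons_append, List.nil_append, List.cons.injEq] at hr
      exact h2 r hr.1.symm hr.2.symm
    have n3 : ¬ (['B','L','V','D','.'] <+: c :: t) := by
      rintro ⟨r, hr⟩
      simp only [List.cons_append, List.nil_append, List.cons.injEq] at hr
      exact h3 r hr.1.symm hr.2.symm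
    have n4 : ¬ (['R','D','.'] <+: c :: t) := by
      rintro ⟨r, hr⟩
      simp only [List.cons_append, List.nil_append, List.cons.injEq] at hr
      exact h4 r hr.1.symm hr.2.symm
    have n5 : ¬ (['D','R','.'] <+: c :: t) := by
      rintro ⟨r, hr⟩
      simp only [List.cons_append, List.nil_append, List.cons.injEq] at hr
      exact (h5 r hr.1.symm hr.2.symm).elim
    have n6 : ¬ (['P','L','.'] <+: c :: t) := by
      rintro ⟨r, hr⟩
      simp only [List.cons_append, List.nil_append, List.cons.injEq] at hr
      exact h6 r hr.1.symm hr.2.symm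
    rw [pvChain_step c t n1 n2 n3 n4 n5 n6, ih (pvBad_tail hb)]
    exact (goB.eq_7 c t h1 h2 h3 h4 h5 h6).symm
  | case8 =>
    intro _
    simp [pvChain, pvRep, goB]


-- ===== tightness: A's six passes equal a 10-entry scan goA on EVERY input, and
-- goA differs from goB everywhere pvBad holds =====

def goA : List Char → List Char
  | 'B'::'L'::'V'::'D'::'.'::'.'::'R'::'.'::t => "BOULEVAROADRIVE".toList ++ goA t
  | 'B'::'L'::'V'::'D'::'.'::'.'::t => "BOULEVAROAD".toList ++ goA t
  | 'B'::'L'::'V'::'D'::'.'::'R'::'.'::t => "BOULEVARDRIVE".toList ++ goA t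
  | 'B'::'L'::'V'::'D'::'.'::t => "BOULEVARD".toList ++ goA t
  | 'R'::'D'::'.'::'R'::'.'::t => "ROADRIVE".toList ++ goA t
  | 'R'::'D'::'.'::t => "ROAD".toList ++ goA t
  | 'S'::'T'::'.'::t => "STREET".toList ++ goA t
  | 'A'::'V'::'E'::'.'::t => "AVENUE".toList ++ goA t
  | 'D'::'R'::'.'::t => "DRIVE".toList ++ goA t
  | 'P'::'L'::'.'::t => "PLACE".toList ++ goA t
  | c :: t => c :: goA t
  | [] => []

lemma pvChain_RDR (t : List Char) :
    pvChain (['R','D','.','R','.'] ++ t) = ['R','O','A','D','R','I','V','E'] ++ pvChain t := by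
  unfold pvChain
  rw [pvRep_append ['S','T','.'] ['S','T','R','E','E','T'] ['R','D','.','R','.'] (by decide),
      pvRep_append ['A','V','E','.'] ['A','V','E','N','U','E'] ['R','D','.','R','.'] (by decide),
      pvRep_append ['B','L','V','D','.'] ['B','O','U','L','E','V','A','R','D'] ['R','D','.','R','.'] (by decide),
      show ∀ z : List Char, (['R','D','.','R','.'] : List Char) ++ z = ['R','D','.'] ++ ('R'::'.'::z) from fun _ => rfl,
      pvRep_match ['R','D','.'] ['R','O','A','D'] _ (by decide),
      pvRep_skip ['R','D','.'] ['R','O','A','D'] 'R' _ (by simp [List.cons_prefix_cons]),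
      pvRep_skip ['R','D','.'] ['R','O','A','D'] '.' _ (by simp [List.cons_prefix_cons]),
      show ∀ z : List Char, (['R','O','A','D'] : List Char) ++ 'R'::'.'::z = 'R'::'O'::'A'::(['D','R','.'] ++ z) from fun _ => rfl,
      pvRep_skip ['D','R','.'] ['D','R','I','V','E'] 'R' _ (by simp [List.cons_prefix_cons]),
      pvRep_skip ['D','R','.'] ['D','R','I','V','E'] 'O' _ (by simp [List.cons_prefix_cons]),
      pvRep_skip ['D','R','.'] ['D','R','I','V','E'] 'A' _ (by simp [List.cons_prefix_cons]),
      pvRep_match ['D','R','.'] ['D','R','I','V','E'] _ (by decide),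
      show ∀ z : List Char, 'R'::'O'::'A'::((['D','R','I','V','E'] : List Char) ++ z) = ['R','O','A','D','R','I','V','E'] ++ z from fun _ => rfl,
      pvRep_append ['P','L','.'] ['P','L','A','C','E'] ['R','O','A','D','R','I','V','E'] (by decide)]

lemma pvChain_BLVD2R (t : List Char) :
    pvChain (['B','L','V','D','.','.','R','.'] ++ t)
      = ['B','O','U','L','E','V','A','R','O','A','D','R','I','V','E'] ++ pvChain t := by
  unfold pvChain
  rw [pvRep_append ['S','T','.'] ['S','T','R','E','E','T'] ['B','L','V','D','.','.','R','.'] (by decide),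
      pvRep_append ['A','V','E','.'] ['A','V','E','N','U','E'] ['B','L','V','D','.','.','R','.'] (by decide),
      show ∀ z : List Char, (['B','L','V','D','.','.','R','.'] : List Char) ++ z = ['B','L','V','D','.'] ++ ('.'::'R'::'.'::z) from fun _ => rfl,
      pvRep_match ['B','L','V','D','.'] ['B','O','U','L','E','V','A','R','D'] _ (by decide),
      pvRep_skip ['B','L','V','D','.'] ['B','O','U','L','E','V','A','R','D'] '.' _ (by simp [List.cons_prefix_cons]),
      pvRep_skip ['B','L','V','D','.'] ['B','O','U','L','E','V','A','R','D'] 'R' _ (by simp [List.cons_prefix_cons]),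
      pvRep_skip ['B','L','V','D','.'] ['B','O','U','L','E','V','A','R','D'] '.' _ (by simp [List.cons_prefix_cons]),
      show ∀ z : List Char, (['B','O','U','L','E','V','A','R','D'] : List Char) ++ '.'::'R'::'.'::z = 'B'::'O'::'U'::'L'::'E'::'V'::'A'::(['R','D','.'] ++ ('R'::'.'::z)) from fun _ => rfl,
      pvRep_skip ['R','D','.'] ['R','O','A','D'] 'B' _ (by simp [List.cons_prefix_cons]),
      pvRep_skip ['R','D','.'] ['R','O','A','D'] 'O' _ (by simp [List.cons_prefix_cons]),
      pvRep_skip ['R','D','.'] ['R','O','A','D'] 'U' _ (by simp [List.cons_prefix_cons]),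
      pvRep_skip ['R','D','.'] ['R','O','A','D'] 'L' _ (by simp [List.cons_prefix_cons]),
      pvRep_skip ['R','D','.'] ['R','O','A','D'] 'E' _ (by simp [List.cons_prefix_cons]),
      pvRep_skip ['R','D','.'] ['R','O','A','D'] 'V' _ (by simp [List.cons_prefix_cons]),
      pvRep_skip ['R','D','.'] ['R','O','A','D'] 'A' _ (by simp [List.cons_prefix_cons]),
      pvRep_match ['R','D','.'] ['R','O','A','D'] _ (by decide),
      pvRep_skip ['R','D','.'] ['R','O','A','D'] 'R' _ (by simp [List.cons_prefix_cons]),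
      pvRep_skip ['R','D','.'] ['R','O','A','D'] '.' _ (by simp [List.cons_prefix_cons]),
      show ∀ z : List Char, 'B'::'O'::'U'::'L'::'E'::'V'::'A'::((['R','O','A','D'] : List Char) ++ 'R'::'.'::z) = 'B'::'O'::'U'::'L'::'E'::'V'::'A'::'R'::'O'::'A'::(['D','R','.'] ++ z) from fun _ => rfl,
      pvRep_skip ['D','R','.'] ['D','R','I','V','E'] 'B' _ (by simp [List.cons_prefix_cons]),
      pvRep_skip ['D','R','.'] ['D','R','I','V','E'] 'O' _ (by simp [List.cons_prefix_cons]),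
      pvRep_skip ['D','R','.'] ['D','R','I','V','E'] 'U' _ (by simp [List.cons_prefix_cons]),
      pvRep_skip ['D','R','.'] ['D','R','I','V','E'] 'L' _ (by simp [List.cons_prefix_cons]),
      pvRep_skip ['D','R','.'] ['D','R','I','V','E'] 'E' _ (by simp [List.cons_prefix_cons]),
      pvRep_skip ['D','R','.'] ['D','R','I','V','E'] 'V' _ (by simp [List.cons_prefix_cons]),
      pvRep_skip ['D','R','.'] ['D','R','I','V','E'] 'A' _ (by simp [List.cons_prefix_cons]),
      pvRep_skip ['D','R','.'] ['D','R','I','V','E'] 'R' _ (by simp [List.cons_prefix_cons]),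
      pvRep_skip ['D','R','.'] ['D','R','I','V','E'] 'O' _ (by simp [List.cons_prefix_cons]),
      pvRep_skip ['D','R','.'] ['D','R','I','V','E'] 'A' _ (by simp [List.cons_prefix_cons]),
      pvRep_match ['D','R','.'] ['D','R','I','V','E'] _ (by decide),
      show ∀ z : List Char, 'B'::'O'::'U'::'L'::'E'::'V'::'A'::'R'::'O'::'A'::((['D','R','I','V','E'] : List Char) ++ z) = ['B','O','U','L','E','V','A','R','O','A','D','R','I','V','E'] ++ z from fun _ => rfl,
      pvRep_append ['P','L','.'] ['P','L','A','C','E'] ['B','O','U','L','E','V','A','R','O','A','D','R','I','V','E'] (by decide)]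

lemma pvChain_BLVD2 (t : List Char) (hR : ¬ (['R','.'] <+: t)) :
    pvChain (['B','L','V','D','.','.'] ++ t) = ['B','O','U','L','E','V','A','R','O','A','D'] ++ pvChain t := by
  unfold pvChain
  rw [pvRep_append ['S','T','.'] ['S','T','R','E','E','T'] ['B','L','V','D','.','.'] (by decide),
      pvRep_append ['A','V','E','.'] ['A','V','E','N','U','E'] ['B','L','V','D','.','.'] (by decide),
      show ∀ z : List Char, (['B','L','V','D','.','.'] : List Char) ++ z = ['B','L','V','D','.'] ++ ('.'::z) from fun _ => rfl,
      pvRep_match ['B','L','V','D','.'] ['B','O','U','L','E','V','A','R','D'] _ (by decide),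
      pvRep_skip ['B','L','V','D','.'] ['B','O','U','L','E','V','A','R','D'] '.' _ (by simp [List.cons_prefix_cons]),
      show ∀ z : List Char, (['B','O','U','L','E','V','A','R','D'] : List Char) ++ '.'::z = 'B'::'O'::'U'::'L'::'E'::'V'::'A'::(['R','D','.'] ++ z) from fun _ => rfl,
      pvRep_skip ['R','D','.'] ['R','O','A','D'] 'B' _ (by simp [List.cons_prefix_cons]),
      pvRep_skip ['R','D','.'] ['R','O','A','D'] 'O' _ (by simp [List.cons_prefix_cons]),
      pvRep_skip ['R','D','.'] ['R','O','A','D'] 'U' _ (by simp [List.cons_prefix_cons]),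
      pvRep_skip ['R','D','.'] ['R','O','A','D'] 'L' _ (by simp [List.cons_prefix_cons]),
      pvRep_skip ['R','D','.'] ['R','O','A','D'] 'E' _ (by simp [List.cons_prefix_cons]),
      pvRep_skip ['R','D','.'] ['R','O','A','D'] 'V' _ (by simp [List.cons_prefix_cons]),
      pvRep_skip ['R','D','.'] ['R','O','A','D'] 'A' _ (by simp [List.cons_prefix_cons]),
      pvRep_match ['R','D','.'] ['R','O','A','D'] _ (by decide)]
  have hR4 : ¬ (['R','.'] <+: pvRep ['R','D','.'] ['R','O','A','D']
      (pvRep ['B','L','V','D','.'] ['B','O','U','L','E','V','A','R','D']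
        (pvRep ['A','V','E','.'] ['A','V','E','N','U','E']
          (pvRep ['S','T','.'] ['S','T','R','E','E','T'] t)))) := by
    rw [pvRep_prefix_iff' _ _ _ (by decide), pvRep_prefix_iff' _ _ _ (by decide),
        pvRep_prefix_iff' _ _ _ (by decide), pvRep_prefix_iff' _ _ _ (by decide)]
    exact hR
  have hDR : ¬ (['D','R','.'] <+: 'D' :: pvRep ['R','D','.'] ['R','O','A','D']
      (pvRep ['B','L','V','D','.'] ['B','O','U','L','E','V','A','R','D']
        (pvRep ['A','V','E','.'] ['A','V','E','N','U','E']
          (pvRep ['S','T','.'] ['S','T','R','E','E','T'] t)))) := by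
    intro hh
    rw [List.cons_prefix_cons] at hh
    exact hR4 hh.2
  rw [show ∀ z : List Char, 'B'::'O'::'U'::'L'::'E'::'V'::'A'::((['R','O','A','D'] : List Char) ++ z) = 'B'::'O'::'U'::'L'::'E'::'V'::'A'::'R'::'O'::'A'::'D'::z from fun _ => rfl,
      pvRep_skip ['D','R','.'] ['D','R','I','V','E'] 'B' _ (by simp [List.cons_prefix_cons]),
      pvRep_skip ['D','R','.'] ['D','R','I','V','E'] 'O' _ (by simp [List.cons_prefix_cons]),
      pvRep_skip ['D','R','.'] ['D','R','I','V','E'] 'U' _ (by simp [List.cons_prefix_cons]),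
      pvRep_skip ['D','R','.'] ['D','R','I','V','E'] 'L' _ (by simp [List.cons_prefix_cons]),
      pvRep_skip ['D','R','.'] ['D','R','I','V','E'] 'E' _ (by simp [List.cons_prefix_cons]),
      pvRep_skip ['D','R','.'] ['D','R','I','V','E'] 'V' _ (by simp [List.cons_prefix_cons]),
      pvRep_skip ['D','R','.'] ['D','R','I','V','E'] 'A' _ (by simp [List.cons_prefix_cons]),
      pvRep_skip ['D','R','.'] ['D','R','I','V','E'] 'R' _ (by simp [List.cons_prefix_cons]),
      pvRep_skip ['D','R','.'] ['D','R','I','V','E'] 'O' _ (by simp [List.cons_prefix_cons]),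
      pvRep_skip ['D','R','.'] ['D','R','I','V','E'] 'A' _ (by simp [List.cons_prefix_cons]),
      pvRep_skip ['D','R','.'] ['D','R','I','V','E'] 'D' _ hDR,
      show ∀ z : List Char, 'B'::'O'::'U'::'L'::'E'::'V'::'A'::'R'::'O'::'A'::'D'::z = ['B','O','U','L','E','V','A','R','O','A','D'] ++ z from fun _ => rfl,
      pvRep_append ['P','L','.'] ['P','L','A','C','E'] ['B','O','U','L','E','V','A','R','O','A','D'] (by decide)]

lemma pvChain_BLVDR (t : List Char) :
    pvChain (['B','L','V','D','.','R','.'] ++ t) = ['B','O','U','L','E','V','A','R','D','R','I','V','E'] ++ pvChain t := by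
  unfold pvChain
  rw [pvRep_append ['S','T','.'] ['S','T','R','E','E','T'] ['B','L','V','D','.','R','.'] (by decide),
      pvRep_append ['A','V','E','.'] ['A','V','E','N','U','E'] ['B','L','V','D','.','R','.'] (by decide),
      show ∀ z : List Char, (['B','L','V','D','.','R','.'] : List Char) ++ z = ['B','L','V','D','.'] ++ ('R'::'.'::z) from fun _ => rfl,
      pvRep_match ['B','L','V','D','.'] ['B','O','U','L','E','V','A','R','D'] _ (by decide),
      pvRep_skip ['B','L','V','D','.'] ['B','O','U','L','E','V','A','R','D'] 'R' _ (by simp [List.cons_prefix_cons]),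
      pvRep_skip ['B','L','V','D','.'] ['B','O','U','L','E','V','A','R','D'] '.' _ (by simp [List.cons_prefix_cons]),
      show ∀ z : List Char, (['B','O','U','L','E','V','A','R','D'] : List Char) ++ 'R'::'.'::z = ['B','O','U','L','E','V','A','R','D','R','.'] ++ z from fun _ => rfl,
      pvRep_append ['R','D','.'] ['R','O','A','D'] ['B','O','U','L','E','V','A','R','D','R','.'] (by decide),
      show ∀ z : List Char, (['B','O','U','L','E','V','A','R','D','R','.'] : List Char) ++ z = 'B'::'O'::'U'::'L'::'E'::'V'::'A'::'R'::(['D','R','.'] ++ z) from fun _ => rfl,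
      pvRep_skip ['D','R','.'] ['D','R','I','V','E'] 'B' _ (by simp [List.cons_prefix_cons]),
      pvRep_skip ['D','R','.'] ['D','R','I','V','E'] 'O' _ (by simp [List.cons_prefix_cons]),
      pvRep_skip ['D','R','.'] ['D','R','I','V','E'] 'U' _ (by simp [List.cons_prefix_cons]),
      pvRep_skip ['D','R','.'] ['D','R','I','V','E'] 'L' _ (by simp [List.cons_prefix_cons]),
      pvRep_skip ['D','R','.'] ['D','R','I','V','E'] 'E' _ (by simp [List.cons_prefix_cons]),
      pvRep_skip ['D','R','.'] ['D','R','I','V','E'] 'V' _ (by simp [List.cons_prefix_cons]),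
      pvRep_skip ['D','R','.'] ['D','R','I','V','E'] 'A' _ (by simp [List.cons_prefix_cons]),
      pvRep_skip ['D','R','.'] ['D','R','I','V','E'] 'R' _ (by simp [List.cons_prefix_cons]),
      pvRep_match ['D','R','.'] ['D','R','I','V','E'] _ (by decide),
      show ∀ z : List Char, 'B'::'O'::'U'::'L'::'E'::'V'::'A'::'R'::((['D','R','I','V','E'] : List Char) ++ z) = ['B','O','U','L','E','V','A','R','D','R','I','V','E'] ++ z from fun _ => rfl,
      pvRep_append ['P','L','.'] ['P','L','A','C','E'] ['B','O','U','L','E','V','A','R','D','R','I','V','E'] (by decide)]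

lemma pvChain_eq_goA : ∀ l : List Char, pvChain l = goA l := by
  intro l
  induction l using goA.induct with
  | case1 t ih =>
    have hl : ('B'::'L'::'V'::'D'::'.'::'.'::'R'::'.'::t) = ['B','L','V','D','.','.','R','.'] ++ t := rfl
    rw [hl, pvChain_BLVD2R, ih, ← hl]
    simp [goA, show "BOULEVAROADRIVE".toList = ['B','O','U','L','E','V','A','R','O','A','D','R','I','V','E'] from by decide]
  | case2 t h ih =>
    have hR : ¬ (['R','.'] <+: t) := by
      rintro ⟨r, hr⟩
      exact h r hr.symm
    have hl : ('B'::'L'::'V'::'D'::'.'::'.'::t) = ['B','L','V','D','.','.'] ++ t := rfl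
    rw [hl, pvChain_BLVD2 t hR, ih, ← hl]
    simp [goA, show "BOULEVAROAD".toList = ['B','O','U','L','E','V','A','R','O','A','D'] from by decide]
  | case3 t ih =>
    have hl : ('B'::'L'::'V'::'D'::'.'::'R'::'.'::t) = ['B','L','V','D','.','R','.'] ++ t := rfl
    rw [hl, pvChain_BLVDR, ih, ← hl]
    simp [goA, show "BOULEVARDRIVE".toList = ['B','O','U','L','E','V','A','R','D','R','I','V','E'] from by decide]
  | case4 t h1 h2 h3 ih =>
    have hdot : t.head? ≠ some '.' := by
      intro hh
      cases t with
      | nil => simp at hh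
      | cons a r =>
        simp at hh
        exact h2 r (by rw [hh])
    have hR : ¬ (['R','.'] <+: t) := by
      rintro ⟨r, hr⟩
      exact (h3 r hr.symm).elim
    have hl : ('B'::'L'::'V'::'D'::'.'::t) = ['B','L','V','D','.'] ++ t := rfl
    rw [hl, pvChain_BLVD t hdot hR, ih, ← hl]
    simp [goA, show "BOULEVARD".toList = ['B','O','U','L','E','V','A','R','D'] from by decide]
  | case5 t ih =>
    have hl : ('R'::'D'::'.'::'R'::'.'::t) = ['R','D','.','R','.'] ++ t := rfl
    rw [hl, pvChain_RDR, ih, ← hl]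
    simp [goA, show "ROADRIVE".toList = ['R','O','A','D','R','I','V','E'] from by decide]
  | case6 t h ih =>
    have hR : ¬ (['R','.'] <+: t) := by
      rintro ⟨r, hr⟩
      exact h r hr.symm
    have hl : ('R'::'D'::'.'::t) = ['R','D','.'] ++ t := rfl
    rw [hl, pvChain_RD t hR, ih, ← hl]
    simp [goA, show "ROAD".toList = ['R','O','A','D'] from by decide]
  | case7 t ih =>
    have hl : ('S'::'T'::'.'::t) = ['S','T','.'] ++ t := rfl
    rw [hl, pvChain_ST, ih, ← hl]
    simp [goA, show "STREET".toList = ['S','T','R','E','E','T'] from by decide]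
  | case8 t ih =>
    have hl : ('A'::'V'::'E'::'.'::t) = ['A','V','E','.'] ++ t := rfl
    rw [hl, pvChain_AVE, ih, ← hl]
    simp [goA, show "AVENUE".toList = ['A','V','E','N','U','E'] from by decide]
  | case9 t ih =>
    have hl : ('D'::'R'::'.'::t) = ['D','R','.'] ++ t := rfl
    rw [hl, pvChain_DR, ih, ← hl]
    simp [goA, show "DRIVE".toList = ['D','R','I','V','E'] from by decide]
  | case10 t ih =>
    have hl : ('P'::'L'::'.'::t) = ['P','L','.'] ++ t := rfl
    rw [hl, pvChain_PL, ih, ← hl]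
    simp [goA, show "PLACE".toList = ['P','L','A','C','E'] from by decide]
  | case11 c t h1 h2 h3 h4 h5 h6 h7 h8 h9 h10 ih =>
    have n1 : ¬ (['S','T','.'] <+: c :: t) := by
      rintro ⟨r, hr⟩
      simp only [List.cons_append, List.nil_append, List.cons.injEq] at hr
      exact h7 r hr.1.symm hr.2.symm
    have n2 : ¬ (['A','V','E','.'] <+: c :: t) := by
      rintro ⟨r, hr⟩
      simp only [List.cons_append, List.nil_append, List.cons.injEq] at hr
      exact h8 r hr.1.symm hr.2.symm
    have n3 : ¬ (['B','L','V','D','.'] <+: c :: t) := by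
      rintro ⟨r, hr⟩
      simp only [List.cons_append, List.nil_append, List.cons.injEq] at hr
      exact h4 r hr.1.symm hr.2.symm
    have n4 : ¬ (['R','D','.'] <+: c :: t) := by
      rintro ⟨r, hr⟩
      simp only [List.cons_append, List.nil_append, List.cons.injEq] at hr
      exact h6 r hr.1.symm hr.2.symm
    have n5 : ¬ (['D','R','.'] <+: c :: t) := by
      rintro ⟨r, hr⟩
      simp only [List.cons_append, List.nil_append, List.cons.injEq] at hr
      exact h9 r hr.1.symm hr.2.symm
    have n6 : ¬ (['P','L','.'] <+: c :: t) := by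
      rintro ⟨r, hr⟩
      simp only [List.cons_append, List.nil_append, List.cons.injEq] at hr
      exact h10 r hr.1.symm hr.2.symm
    rw [pvChain_step c t n1 n2 n3 n4 n5 n6, ih]
    exact (goA.eq_11 c t h1 h2 h3 h4 h5 h6 h7 h8 h9 h10).symm
  | case12 =>
    simp [pvChain, pvRep, goA]

lemma pvBad_cons_elim {c : Char} {t : List Char} (h : pvBad (c :: t)) :
    (['R','D','.','R','.'] <+: c :: t) ∨ (['B','L','V','D','.','.'] <+: c :: t) ∨
    (['B','L','V','D','.','R','.'] <+: c :: t) ∨ pvBad t := by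
  rcases h with h1 | h1 | h1
  · rcases List.infix_cons_iff.mp h1 with hp | hi
    · exact Or.inl hp
    · exact Or.inr (Or.inr (Or.inr (Or.inl hi)))
  · rcases List.infix_cons_iff.mp h1 with hp | hi
    · exact Or.inr (Or.inl hp)
    · exact Or.inr (Or.inr (Or.inr (Or.inr (Or.inl hi))))
  · rcases List.infix_cons_iff.mp h1 with hp | hi
    · exact Or.inr (Or.inr (Or.inl hp))
    · exact Or.inr (Or.inr (Or.inr (Or.inr (Or.inr hi))))

lemma pvNe : ∀ l : List Char, pvBad l → goA l ≠ goB l := by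
  intro l
  induction l using goA.induct with
  | case1 t ih =>
    intro _ heq
    simp [goA, goB] at heq
  | case2 t h ih =>
    intro hb heq
    simp [goA, goB] at heq
  | case3 t ih =>
    intro _ heq
    simp [goA, goB] at heq
  | case4 t h1 h2 h3 ih =>
    intro hb heq
    have hbt : pvBad t := by
      rcases pvBad_cons_elim hb with hp | hp | hp | h'
      · simp [List.cons_prefix_cons] at hp
      · rcases hp with ⟨r, hr⟩
        simp only [List.cons_append, List.nil_append, List.cons.injEq, true_and] at hr
        exact (h2 r hr.symm).elim
      · rcases hp with ⟨r, hr⟩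
        simp only [List.cons_append, List.nil_append, List.cons.injEq, true_and] at hr
        exact (h3 r hr.symm).elim
      · rcases pvBad_cons_elim h' with hp | hp | hp | h'' <;>
          first
          | (rcases pvBad_cons_elim h'' with hp | hp | hp | h3' ;
             · simp [List.cons_prefix_cons] at hp
             · simp [List.cons_prefix_cons] at hp
             · simp [List.cons_prefix_cons] at hp
             · rcases pvBad_cons_elim h3' with hp | hp | hp | h4' ;
               · simp [List.cons_prefix_cons] at hp
               · simp [List.cons_prefix_cons] at hp
               · simp [List.cons_prefix_cons] at hp
               · rcases pvBad_cons_elim h4' with hp | hp | hp | h5' ;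
                 · simp [List.cons_prefix_cons] at hp
                 · simp [List.cons_prefix_cons] at hp
                 · simp [List.cons_prefix_cons] at hp
                 · exact h5')
          | simp [List.cons_prefix_cons] at hp
    simp [goA, goB] at heq
    exact ih hbt heq
  | case5 t ih =>
    intro _ heq
    simp [goA, goB] at heq
  | case6 t h ih =>
    intro hb heq
    have hbt : pvBad t := by
      rcases pvBad_cons_elim hb with hp | hp | hp | h'
      · rcases hp with ⟨r, hr⟩
        simp only [List.cons_append, List.nil_append, List.cons.injEq, true_and] at hr
        exact (h r hr.symm).elim
      · simp [List.cons_prefix_cons] at hp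
      · simp [List.cons_prefix_cons] at hp
      · rcases pvBad_cons_elim h' with hp | hp | hp | h''
        · simp [List.cons_prefix_cons] at hp
        · simp [List.cons_prefix_cons] at hp
        · simp [List.cons_prefix_cons] at hp
        · rcases pvBad_cons_elim h'' with hp | hp | hp | h3'
          · simp [List.cons_prefix_cons] at hp
          · simp [List.cons_prefix_cons] at hp
          · simp [List.cons_prefix_cons] at hp
          · exact h3'
    simp [goA, goB] at heq
    exact ih hbt heq
  | case7 t ih =>
    intro hb heq
    have hbt : pvBad t := by
      rcases pvBad_cons_elim hb with hp | hp | hp | h'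
      · simp [List.cons_prefix_cons] at hp
      · simp [List.cons_prefix_cons] at hp
      · simp [List.cons_prefix_cons] at hp
      · rcases pvBad_cons_elim h' with hp | hp | hp | h''
        · simp [List.cons_prefix_cons] at hp
        · simp [List.cons_prefix_cons] at hp
        · simp [List.cons_prefix_cons] at hp
        · rcases pvBad_cons_elim h'' with hp | hp | hp | h3'
          · simp [List.cons_prefix_cons] at hp
          · simp [List.cons_prefix_cons] at hp
          · simp [List.cons_prefix_cons] at hp
          · exact h3'
    simp [goA, goB] at heq
    exact ih hbt heq
  | case8 t ih =>
    intro hb heq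
    have hbt : pvBad t := by
      rcases pvBad_cons_elim hb with hp | hp | hp | h'
      · simp [List.cons_prefix_cons] at hp
      · simp [List.cons_prefix_cons] at hp
      · simp [List.cons_prefix_cons] at hp
      · rcases pvBad_cons_elim h' with hp | hp | hp | h''
        · simp [List.cons_prefix_cons] at hp
        · simp [List.cons_prefix_cons] at hp
        · simp [List.cons_prefix_cons] at hp
        · rcases pvBad_cons_elim h'' with hp | hp | hp | h3'
          · simp [List.cons_prefix_cons] at hp
          · simp [List.cons_prefix_cons] at hp
          · simp [List.cons_prefix_cons] at hp
          · rcases pvBad_cons_elim h3' with hp | hp | hp | h4'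
            · simp [List.cons_prefix_cons] at hp
            · simp [List.cons_prefix_cons] at hp
            · simp [List.cons_prefix_cons] at hp
            · exact h4'
    simp [goA, goB] at heq
    exact ih hbt heq
  | case9 t ih =>
    intro hb heq
    have hbt : pvBad t := by
      rcases pvBad_cons_elim hb with hp | hp | hp | h'
      · simp [List.cons_prefix_cons] at hp
      · simp [List.cons_prefix_cons] at hp
      · simp [List.cons_prefix_cons] at hp
      · rcases pvBad_cons_elim h' with hp | hp | hp | h''
        · simp [List.cons_prefix_cons] at hp
        · simp [List.cons_prefix_cons] at hp
        · simp [List.cons_prefix_cons] at hp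
        · rcases pvBad_cons_elim h'' with hp | hp | hp | h3'
          · simp [List.cons_prefix_cons] at hp
          · simp [List.cons_prefix_cons] at hp
          · simp [List.cons_prefix_cons] at hp
          · exact h3'
    simp [goA, goB] at heq
    exact ih hbt heq
  | case10 t ih =>
    intro hb heq
    have hbt : pvBad t := by
      rcases pvBad_cons_elim hb with hp | hp | hp | h'
      · simp [List.cons_prefix_cons] at hp
      · simp [List.cons_prefix_cons] at hp
      · simp [List.cons_prefix_cons] at hp
      · rcases pvBad_cons_elim h' with hp | hp | hp | h''
        · simp [List.cons_prefix_cons] at hp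
        · simp [List.cons_prefix_cons] at hp
        · simp [List.cons_prefix_cons] at hp
        · rcases pvBad_cons_elim h'' with hp | hp | hp | h3'
          · simp [List.cons_prefix_cons] at hp
          · simp [List.cons_prefix_cons] at hp
          · simp [List.cons_prefix_cons] at hp
          · exact h3'
    simp [goA, goB] at heq
    exact ih hbt heq
  | case11 c t h1 h2 h3 h4 h5 h6 h7 h8 h9 h10 ih =>
    intro hb heq
    have hbt : pvBad t := by
      rcases pvBad_cons_elim hb with hp | hp | hp | h'
      · rcases hp with ⟨r, hr⟩
        simp only [List.cons_append, List.nil_append, List.cons.injEq] at hr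
        exact (h5 r hr.1.symm hr.2.symm).elim
      · rcases hp with ⟨r, hr⟩
        simp only [List.cons_append, List.nil_append, List.cons.injEq] at hr
        exact (h2 r hr.1.symm hr.2.symm).elim
      · rcases hp with ⟨r, hr⟩
        simp only [List.cons_append, List.nil_append, List.cons.injEq] at hr
        exact (h3 r hr.1.symm hr.2.symm).elim
      · exact h'
    rw [goA.eq_11 c t h1 h2 h3 h4 h5 h6 h7 h8 h9 h10,
        goB.eq_7 c t (fun r hc ht => h7 r hc ht) (fun r hc ht => h8 r hc ht)
          (fun r hc ht => h4 r hc ht) (fun r hc ht => h6 r hc ht)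
          (fun r hc ht => h9 r hc ht) (fun r hc ht => h10 r hc ht)] at heq
    exact ih hbt (List.cons.inj heq).2
  | case12 =>
    intro hb
    rcases hb with h | h | h <;> simpa using h.length_le

theorem normalize_street_name_py_spec : Claim_unchanged_normalize_street_name_py := by
  intro s _
  unfold Spec_normalize_street_name_py
  intro hnd
  by_cases hs : s = ""
  · simp [normalize_street_name_py, normalize_street_name_py_alt, hs]
  · unfold normalize_street_name_py normalize_street_name_py_alt
    rw [if_neg hs, if_neg hs]
    refine String.toList_inj.mp ?_
    simp only [PySem.Str.toList_replace, String.toList_ofList]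
    rw [pvReplace_eq_pvRep _ _ _ (by decide), pvReplace_eq_pvRep _ _ _ (by decide),
        pvReplace_eq_pvRep _ _ _ (by decide), pvReplace_eq_pvRep _ _ _ (by decide),
        pvReplace_eq_pvRep _ _ _ (by decide), pvReplace_eq_pvRep _ _ _ (by decide)]
    rw [show "ST.".toList = ['S','T','.'] from by decide,
        show "STREET".toList = ['S','T','R','E','E','T'] from by decide,
        show "AVE.".toList = ['A','V','E','.'] from by decide,
        show "AVENUE".toList = ['A','V','E','N','U','E'] from by decide,
        show "BLVD.".toList = ['B','L','V','D','.'] from by decide,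
        show "BOULEVARD".toList = ['B','O','U','L','E','V','A','R','D'] from by decide,
        show "RD.".toList = ['R','D','.'] from by decide,
        show "ROAD".toList = ['R','O','A','D'] from by decide,
        show "DR.".toList = ['D','R','.'] from by decide,
        show "DRIVE".toList = ['D','R','I','V','E'] from by decide,
        show "PL.".toList = ['P','L','.'] from by decide,
        show "PLACE".toList = ['P','L','A','C','E'] from by decide]
    apply pvMain
    intro hbad
    apply hnd
    unfold D_normalize_street_name_py
    rcases hbad with h | h | h
    · exact ⟨"RD.R.", by simp, (PySem.Str.isIn_iff_infix _ _).mpr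
        (by rw [show "RD.R.".toList = ['R','D','.','R','.'] from by decide]; exact h)⟩
    · exact ⟨"BLVD..", by simp, (PySem.Str.isIn_iff_infix _ _).mpr
        (by rw [show "BLVD..".toList = ['B','L','V','D','.','.'] from by decide]; exact h)⟩
    · exact ⟨"BLVD.R.", by simp, (PySem.Str.isIn_iff_infix _ _).mpr
        (by rw [show "BLVD.R.".toList = ['B','L','V','D','.','R','.'] from by decide]; exact h)⟩

theorem normalize_street_name_py_changed : Claim_changed_normalize_street_name_py := by
  unfold Claim_changed_normalize_street_name_py; decide

theorem normalize_street_name_py_tight : Claim_exact_normalize_street_name_py := by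
  intro s _ hd
  unfold D_normalize_street_name_py at hd
  obtain ⟨p, hp, hin⟩ := hd
  have hbad : pvBad (PySem.Str.strip (PySem.Str.upper s)).toList := by
    have hinf := (PySem.Str.isIn_iff_infix _ _).mp hin
    fin_cases hp
    · exact Or.inl (by rw [show "RD.R.".toList = ['R','D','.','R','.'] from by decide] at hinf; exact hinf)
    · exact Or.inr (Or.inl (by rw [show "BLVD..".toList = ['B','L','V','D','.','.'] from by decide] at hinf; exact hinf))
    · exact Or.inr (Or.inr (by rw [show "BLVD.R.".toList = ['B','L','V','D','.','R','.'] from by decide] at hinf; exact hinf))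
  have hs : s ≠ "" := by
    intro h0
    subst h0
    rcases hbad with h | h | h <;> exact absurd h (by decide)
  intro heq
  have htl := congrArg String.toList heq
  have hA : (normalize_street_name_py s).toList
      = pvChain (PySem.Str.strip (PySem.Str.upper s)).toList := by
    unfold normalize_street_name_py
    rw [if_neg hs]
    simp only [PySem.Str.toList_replace]
    rw [pvReplace_eq_pvRep _ _ _ (by decide), pvReplace_eq_pvRep _ _ _ (by decide),
        pvReplace_eq_pvRep _ _ _ (by decide), pvReplace_eq_pvRep _ _ _ (by decide),
        pvReplace_eq_pvRep _ _ _ (by decide), pvReplace_eq_pvRep _ _ _ (by decide)]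
    rw [show "ST.".toList = ['S','T','.'] from by decide,
        show "STREET".toList = ['S','T','R','E','E','T'] from by decide,
        show "AVE.".toList = ['A','V','E','.'] from by decide,
        show "AVENUE".toList = ['A','V','E','N','U','E'] from by decide,
        show "BLVD.".toList = ['B','L','V','D','.'] from by decide,
        show "BOULEVARD".toList = ['B','O','U','L','E','V','A','R','D'] from by decide,
        show "RD.".toList = ['R','D','.'] from by decide,
        show "ROAD".toList = ['R','O','A','D'] from by decide,
        show "DR.".toList = ['D','R','.'] from by decide,
        show "DRIVE".toList = ['D','R','I','V','E'] from by decide,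
        show "PL.".toList = ['P','L','.'] from by decide,
        show "PLACE".toList = ['P','L','A','C','E'] from by decide]
    rfl
  have hB : (normalize_street_name_py_alt s).toList
      = goB (PySem.Str.strip (PySem.Str.upper s)).toList := by
    unfold normalize_street_name_py_alt
    rw [if_neg hs]
    simp only [String.toList_ofList]
  rw [hA, hB, pvChain_eq_goA] at htl
  exact pvNe _ hbad htl
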